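-- pv_equiv track=rewrite | github.com/KapyBoiveau/AoC | 2015/day19/d19p1.py | ungroupMol
-- ===== SOURCE A (Python) =====
-- def ungroupMol(string):
--     skip = False
--     medicine = []
--     for i in range(len(string)):
--         if skip:
--             skip = False
--             continue
--         if i+1 < len(string):
--             if string[i+1].isupper() or string[i+1] == 'e':
--                 medicine.append(string[i])
--             else:
--                 medicine.append(string[i]+string[i+1])
--                 skip = True
--         else:
--             medicine.append(string[i])
--
--     return medicine
-- ===== SOURCE B (Python) =====
-- def ungroupMol(string):
--     # Two staged passes instead of one lookahead loop:
--     # stage 1 groups the characters into segments, a new segment opening at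
--     # every break character (uppercase or 'e'); stage 2 chops every segment
--     # into chunks of two characters (plus a final single char if odd).
--     segs = []
--     for c in string:
--         if segs and not (c.isupper() or c == 'e'):
--             segs[-1].append(c)
--         else:
--             segs.append([c])
--     return [''.join(seg[j:j+2]) for seg in segs for j in range(0, len(seg), 2)]
-- ===== Notes on version B (the rewrite author's own statement) =====
-- stated objective: alternative
-- what changed: Replaces A's single indexed loop with string[i+1] lookahead and a skip flag by two staged passes: first group the characters into segments that open at every break character (uppercase or 'e'), then chop each segment into two-character chunks with slices over range(0, len(seg), 2).
import Mathlib
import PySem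

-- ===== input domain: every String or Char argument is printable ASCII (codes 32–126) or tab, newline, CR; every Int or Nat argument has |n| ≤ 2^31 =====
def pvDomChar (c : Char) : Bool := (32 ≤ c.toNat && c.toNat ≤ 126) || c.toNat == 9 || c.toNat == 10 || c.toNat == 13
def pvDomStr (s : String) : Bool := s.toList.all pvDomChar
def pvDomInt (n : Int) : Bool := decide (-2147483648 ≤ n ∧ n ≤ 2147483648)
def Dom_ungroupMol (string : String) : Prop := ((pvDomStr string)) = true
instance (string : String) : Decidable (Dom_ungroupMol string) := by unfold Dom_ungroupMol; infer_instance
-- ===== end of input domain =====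

-- B tokenizes in two staged passes (group into segments at break characters,
-- then chop each segment into pairs) instead of A's lookahead loop with a skip
-- flag; same O(n) cost, different decomposition (objective: alternative).

-- ===== PORT A =====
-- A's index loop 'for i in range(len(string))' with the skip flag, rendered as
-- the structural recursion over the remaining characters in the same state:
-- string[i] is the head, string[i+1] the lookahead on the tail.
def ungroupMolLoop : Bool → List Char → List String
  | true, _ :: rest => ungroupMolLoop false rest          -- if skip: skip = False; continue
  | false, c :: d :: rest =>                              -- i+1 < len(string)
      if PySem.Chars.isupper d || d = 'e' then
        String.ofList [c] :: ungroupMolLoop false (d :: rest)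
      else
        String.ofList [c, d] :: ungroupMolLoop true (d :: rest)
  | false, [c] => [String.ofList [c]]                     -- last character
  | _, [] => []

def ungroupMol (string : String) : List String :=
  ungroupMolLoop false string.toList

-- ===== PORT B =====
-- stage 1, one step of 'for c in string': either extend the last segment
-- (segs[-1] += c) or open a new one (segs.append(c))
def ungroupMolAltStep (segs : List (List Char)) (c : Char) : List (List Char) :=
  if !segs.isEmpty && !(PySem.Chars.isupper c || c = 'e') then
    segs.dropLast ++ [(segs.getLast?.getD []) ++ [c]]
  else
    segs ++ [[c]]

-- '[seg[j:j+2] for seg in segs for j in range(0, len(seg), 2)]' over stage 1's result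
def ungroupMol_alt (string : String) : List String :=
  (string.toList.foldl ungroupMolAltStep []).flatMap (fun seg =>
    (PySem.List.pyRange 0 (seg.length : Int) 2).map (fun j =>
      String.ofList (PySem.List.slice seg (some j) (some (j + 2)))))

-- ===== PRECONDITION & SPEC =====
def Spec_ungroupMol (string : String) (out : List String) : Prop := out = ungroupMol_alt string
instance (string : String) (out : List String) : Decidable (Spec_ungroupMol string out) := by unfold Spec_ungroupMol; infer_instance

-- ===== CLAIM (what is proved, stated in full; the proofs are below) =====
def Claim_equal_ungroupMol : Prop := ∀ (string : String), Dom_ungroupMol string → Spec_ungroupMol string (ungroupMol string)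

-- ===== LEMMAS AND PROOFS =====

-- 'non-break' characters: those a segment absorbs
def nb (c : Char) : Bool := !(PySem.Chars.isupper c || c = 'e')

-- the segments stage 1 produces, characterised recursively
def segsOf : List Char → List (List Char)
  | [] => []
  | c :: rest => (c :: rest.takeWhile nb) :: segsOf (rest.dropWhile nb)
termination_by cs => cs.length
decreasing_by
  simpa [Nat.lt_succ_iff] using List.length_dropWhile_le nb rest

theorem segsOf_nil : segsOf [] = [] := by rw [segsOf]

theorem nb_eq_true {c : Char} (h : nb c = true) :
    (PySem.Chars.isupper c || c = 'e') = false := by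
  revert h; unfold nb
  cases (PySem.Chars.isupper c || decide (c = 'e')) <;> simp

theorem nb_eq_false {c : Char} (h : nb c = false) :
    (PySem.Chars.isupper c || c = 'e') = true := by
  revert h; unfold nb
  cases (PySem.Chars.isupper c || decide (c = 'e')) <;> simp

theorem segsOf_cons (c : Char) (rest : List Char) :
    segsOf (c :: rest) = (c :: rest.takeWhile nb) :: segsOf (rest.dropWhile nb) := by
  rw [segsOf]

-- chunks of two with a final singleton
def chunk : List Char → List (List Char)
  | [] => []
  | [c] => [[c]]
  | c :: d :: rest => [c, d] :: chunk rest

-- the token list, as char lists (reference form both ports are reduced to)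
def tokL : List Char → List (List Char)
  | [] => []
  | [c] => [[c]]
  | c :: d :: rest =>
      if nb d then [c, d] :: tokL rest else [c] :: tokL (d :: rest)

-- ---- A's loop produces the tokens ----
theorem loopA_eq_tokL (cs : List Char) :
    ungroupMolLoop false cs = (tokL cs).map String.ofList := by
  induction cs using tokL.induct with
  | case1 => rfl
  | case2 c => rfl
  | case3 c d rest hnb ih =>
      have hb := nb_eq_true hnb
      simp [ungroupMolLoop, tokL, hnb, hb, ih]
  | case4 c d rest hnb ih =>
      have h' : nb d = false := by simpa using hnb
      have hb := nb_eq_false h'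
      simp [ungroupMolLoop, tokL, h', hb, ih]

-- ---- stage 1 computes segsOf ----
theorem foldl_step_inv (cs : List Char) :
    ∀ (acc : List (List Char)) (cur : List Char),
      cs.foldl ungroupMolAltStep (acc ++ [cur])
        = acc ++ ((cur ++ cs.takeWhile nb) :: segsOf (cs.dropWhile nb)) := by
  induction cs with
  | nil => intro acc cur; simp [segsOf_nil]
  | cons c cs ih =>
      intro acc cur
      by_cases h : nb c = true
      · have hb : (PySem.Chars.isupper c || decide (c = 'e')) = false := by
          simpa [nb] using h
        have hstep : ungroupMolAltStep (acc ++ [cur]) c = acc ++ [cur ++ [c]] := by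
          simp [ungroupMolAltStep, hb]
        simp only [List.foldl_cons, hstep, ih acc (cur ++ [c]),
          List.takeWhile_cons, List.dropWhile_cons, h]
        simp
      · have h' : nb c = false := by simpa using h
        have hb := nb_eq_false h' 
        have hstep : ungroupMolAltStep (acc ++ [cur]) c = (acc ++ [cur]) ++ [[c]] := by
          simp [ungroupMolAltStep, hb]
        simp only [List.foldl_cons, hstep, ih (acc ++ [cur]) [c],
          List.takeWhile_cons, List.dropWhile_cons, h']
        simp [segsOf_cons]

theorem foldl_step_eq_segsOf (cs : List Char) :
    cs.foldl ungroupMolAltStep [] = segsOf cs := by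
  cases cs with
  | nil => simp [segsOf_nil]
  | cons c cs =>
      have hstep : ungroupMolAltStep [] c = [] ++ [[c]] := by
        simp [ungroupMolAltStep]
      simp only [List.foldl_cons, hstep, foldl_step_inv cs [] [c]]
      rw [segsOf_cons]
      simp

-- ---- pyRange-with-step-2 induction forms ----
theorem pyRange_two_nil (a b : Int) (h : b ≤ a) :
    PySem.List.pyRange a b 2 = [] := by
  rw [PySem.List.pyRange_of_pos a b (by norm_num)]
  rw [if_neg (by omega)]
  simp

theorem pyRange_two_cons (a b : Int) (h : a < b) :
    PySem.List.pyRange a b 2 = a :: PySem.List.pyRange (a + 2) b 2 := by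
  rw [PySem.List.pyRange_of_pos a b (by norm_num),
      PySem.List.pyRange_of_pos (a + 2) b (by norm_num)]
  rw [if_pos h]
  by_cases h2 : a + 2 < b
  · rw [if_pos h2]
    have hc : ((b - a + 2 - 1) / 2).toNat = ((b - (a + 2) + 2 - 1) / 2).toNat + 1 := by
      omega
    rw [hc, List.range_succ_eq_map]
    simp only [List.map_cons, List.map_map]
    congr 1
    · simp
    · apply List.map_congr_left
      intro k _
      simp only [Function.comp]
      push_cast
      ring
  · rw [if_neg h2]
    have hc : ((b - a + 2 - 1) / 2).toNat = 1 := by omega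
    rw [hc]
    simp

-- ---- stage 2 chops a segment into chunks ----
theorem range2_slice (r : List Char) :
    ∀ (a : Nat) (s : List Char), s.drop a = r →
      (PySem.List.pyRange (a : Int) (s.length : Int) 2).map (fun j =>
          PySem.List.slice s (some j) (some (j + 2))) = chunk r := by
  induction r using chunk.induct with
  | case1 =>
      intro a s hdrop
      have hlen : (s.length : Int) ≤ (a : Int) := by
        have := List.drop_eq_nil_iff.mp hdrop
        exact_mod_cast this
      rw [pyRange_two_nil _ _ hlen]
      rfl
  | case2 c =>
      intro a s hdrop
      have hlen : s.length = a + 1 := by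
        have := congrArg List.length hdrop
        simp at this
        omega
      have hlt : (a : Int) < (s.length : Int) := by exact_mod_cast by omega
      rw [pyRange_two_cons _ _ hlt]
      have hnil : PySem.List.pyRange ((a : Int) + 2) (s.length : Int) 2 = [] := by
        apply pyRange_two_nil; exact_mod_cast by omega
      rw [hnil]
      have hsl : PySem.List.slice s (some (a : Int)) (some ((a : Int) + 2))
          = (s.drop a).take 2 := by
        have := PySem.List.slice_natCast_add (xs := s) (j := a) (n := 2)
        simpa using this
      simp [hsl, hdrop, chunk]
  | case3 c d rest ih =>
      intro a s hdrop
      have hlen : a + 2 ≤ s.length := by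
        have := congrArg List.length hdrop
        simp at this
        omega
      have hlt : (a : Int) < (s.length : Int) := by exact_mod_cast by omega
      rw [pyRange_two_cons _ _ hlt]
      have hdrop' : s.drop (a + 2) = rest := by
        have h2 := congrArg (List.drop 2) hdrop
        simpa [List.drop_drop, Nat.add_comm] using h2
      have hsl : PySem.List.slice s (some (a : Int)) (some ((a : Int) + 2))
          = (s.drop a).take 2 := by
        have := PySem.List.slice_natCast_add (xs := s) (j := a) (n := 2)
        simpa using this
      have hcast : ((a : Int) + 2) = ((a + 2 : Nat) : Int) := by push_cast; ring
      rw [List.map_cons, hsl, hdrop, hcast, ih (a + 2) s hdrop']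
      simp [chunk]

-- ---- the chunks of the segments are the tokens ----
theorem chunk_take_drop (rest : List Char) :
    chunk (rest.takeWhile nb) ++ List.flatMap chunk (segsOf (rest.dropWhile nb))
      = List.flatMap chunk (segsOf rest) := by
  cases rest with
  | nil => simp [segsOf_nil, chunk]
  | cons x xs =>
      by_cases h : nb x = true
      · rw [segsOf_cons]
        simp [h]
      · have h' : nb x = false := by simpa using h
        simp [h', chunk]

theorem segs_chunk_eq_tokL (cs : List Char) :
    List.flatMap chunk (segsOf cs) = tokL cs := by
  induction cs using tokL.induct with
  | case1 => simp [segsOf_nil, tokL]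
  | case2 c => rw [segsOf_cons]; simp [segsOf_nil, tokL, chunk]
  | case3 c d rest hnb ih =>
      have e1 : (d :: rest).takeWhile nb = d :: rest.takeWhile nb := by
        simp [hnb]
      have e2 : (d :: rest).dropWhile nb = rest.dropWhile nb := by
        simp [hnb]
      rw [segsOf_cons, e1, e2, List.flatMap_cons]
      have e3 : chunk (c :: d :: rest.takeWhile nb)
          = [c, d] :: chunk (rest.takeWhile nb) := rfl
      rw [e3, List.cons_append, chunk_take_drop rest, ih]
      have e4 : tokL (c :: d :: rest) = [c, d] :: tokL rest := by simp [tokL, hnb]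
      rw [e4]
  | case4 c d rest hnb ih =>
      have h' : nb d = false := by simpa using hnb
      have e1 : (d :: rest).takeWhile nb = [] := by simp [h']
      have e2 : (d :: rest).dropWhile nb = d :: rest := by simp [h']
      rw [segsOf_cons, e1, e2, List.flatMap_cons]
      have e3 : chunk [c] = [[c]] := rfl
      rw [e3, ih]
      have e4 : tokL (c :: d :: rest) = [c] :: tokL (d :: rest) := by simp [tokL, h']
      rw [e4]
      simp

-- ===== VERDICT (by name: the statement is the Claim_ definition above) =====
theorem ungroupMol_spec : Claim_equal_ungroupMol := by
  intro s _
  unfold Spec_ungroupMol ungroupMol ungroupMol_alt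
  rw [loopA_eq_tokL, foldl_step_eq_segsOf, ← segs_chunk_eq_tokL]
  rw [List.map_flatMap]
  apply List.flatMap_congr
  intro seg _
  rw [← range2_slice seg 0 seg (by simp)]
  simp
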